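-- pv_equiv track=rewrite | github.com/viksx-intel/Linux_log_parser | Parser_2/Parser_2.2/linux_parser_v_2_2.py | get_file_names
-- ===== SOURCE A (Python) =====
-- MAX_ROWS = 1000000
--
-- def get_file_names(file_name,n_rows):
--     quo = n_rows//MAX_ROWS
--     index = 0
--     file_names=[]
--     start_indexes=[]
--     end_indexes = []
--     if(quo>0):
--         for r in range(1,quo+1):
--             file_names.append(file_name+"_"+str(r)+".xlsx")
--             start_indexes.append(index)
--             index = index+MAX_ROWS
--             end_indexes.append(index)
--         rem = n_rows%MAX_ROWS
--         if(rem>0):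
--             file_names.append(file_name+"_"+str(r+1)+".xlsx")
--             start_indexes.append(index)
--             index=index+rem
--             end_indexes.append(index)
--     else:
--         file_names.append(file_name+".xlsx")
--         start_indexes.append(index)
--         end_indexes.append(index+n_rows)
--     return(file_names,start_indexes,end_indexes)
-- ===== SOURCE B (Python) =====
-- MAX_ROWS = 1000000
--
-- def get_file_names(file_name, n_rows):
--     if n_rows // MAX_ROWS > 0:
--         n_chunks = -(-n_rows // MAX_ROWS)  # ceil division
--         names = [file_name + "_" + str(i + 1) + ".xlsx" for i in range(n_chunks)]
--         starts = [i * MAX_ROWS for i in range(n_chunks)]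
--         ends = [min((i + 1) * MAX_ROWS, n_rows) for i in range(n_chunks)]
--         return (names, starts, ends)
--     return ([file_name + ".xlsx"], [0], [n_rows])
-- ===== Notes on version B (the rewrite author's own statement) =====
-- stated objective: idiomatic
-- what changed: Replaced the accumulator loop with its trailing remainder special-case by closed-form comprehensions over the ceil-divided chunk count (starts i*MAX_ROWS, ends min((i+1)*MAX_ROWS, n_rows)).
import Mathlib
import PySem

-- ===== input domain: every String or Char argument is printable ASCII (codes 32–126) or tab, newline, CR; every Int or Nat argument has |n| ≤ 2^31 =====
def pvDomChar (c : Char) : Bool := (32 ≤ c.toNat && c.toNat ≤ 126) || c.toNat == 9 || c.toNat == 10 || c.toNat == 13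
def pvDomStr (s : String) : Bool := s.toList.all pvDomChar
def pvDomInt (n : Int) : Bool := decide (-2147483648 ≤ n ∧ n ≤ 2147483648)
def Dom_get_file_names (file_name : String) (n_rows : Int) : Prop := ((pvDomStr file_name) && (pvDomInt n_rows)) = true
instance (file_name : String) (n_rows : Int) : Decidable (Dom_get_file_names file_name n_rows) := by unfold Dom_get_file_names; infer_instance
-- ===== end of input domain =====

-- B replaces A's accumulator loop (with its trailing remainder special-case) by closed-form
-- comprehensions over the ceil-divided chunk count (idiomatic; same cost).

-- ===== PORT A =====
def get_file_names (file_name : String) (n_rows : Int) : List String × List Int × List Int :=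
  let MAXR : Int := 1000000
  let quo := PySem.Int.floordiv n_rows MAXR
  let index : Int := 0
  let file_names : List String := []
  let start_indexes : List Int := []
  let end_indexes : List Int := []
  if quo > 0 then
    -- for r in range(1, quo+1): append name r; append index; index += MAX_ROWS; append index
    let st := (PySem.List.pyRange 1 (quo+1) 1).foldl
      (fun (s : Int × List String × List Int × List Int) r =>
        (s.1 + MAXR,
         s.2.1 ++ [file_name ++ "_" ++ PySem.Int.toStr r ++ ".xlsx"],
         s.2.2.1 ++ [s.1],
         s.2.2.2 ++ [s.1 + MAXR]))
      (index, file_names, start_indexes, end_indexes)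
    let rem := PySem.Int.mod n_rows MAXR
    if rem > 0 then
      -- Python uses leftover loop variable r = quo here, so r+1 = quo+1
      (st.2.1 ++ [file_name ++ "_" ++ PySem.Int.toStr (quo+1) ++ ".xlsx"],
       st.2.2.1 ++ [st.1],
       st.2.2.2 ++ [st.1 + rem])
    else (st.2.1, st.2.2.1, st.2.2.2)
  else
    (file_names ++ [file_name ++ ".xlsx"],
     start_indexes ++ [index],
     end_indexes ++ [index + n_rows])

-- ===== PORT B =====
def get_file_names_alt (file_name : String) (n_rows : Int) : List String × List Int × List Int :=
  let MAXR : Int := 1000000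
  if PySem.Int.floordiv n_rows MAXR > 0 then
    let c := -(PySem.Int.floordiv (-n_rows) MAXR)   -- ceil division
    ((PySem.List.pyRange 0 c 1).map (fun i => file_name ++ "_" ++ PySem.Int.toStr (i + 1) ++ ".xlsx"),
     (PySem.List.pyRange 0 c 1).map (fun i => i * MAXR),
     (PySem.List.pyRange 0 c 1).map (fun i => min ((i + 1) * MAXR) n_rows))
  else ([file_name ++ ".xlsx"], [0], [n_rows])

-- ===== PRECONDITION & SPEC =====
def Spec_get_file_names (file_name : String) (n_rows : Int) (out : List String × List Int × List Int) : Prop := out = get_file_names_alt file_name n_rows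
instance (file_name : String) (n_rows : Int) (out : List String × List Int × List Int) : Decidable (Spec_get_file_names file_name n_rows out) := by unfold Spec_get_file_names; infer_instance

-- ===== CLAIM (what is proved, stated in full; the proofs are below) =====
def Claim_equal_get_file_names : Prop := ∀ (file_name : String) (n_rows : Int), Dom_get_file_names file_name n_rows → Spec_get_file_names file_name n_rows (get_file_names file_name n_rows)

-- ===== LEMMAS AND PROOFS =====

theorem pv_fdiv_pos (a : Int) : PySem.Int.floordiv a 1000000 = a / 1000000 := by
  show Int.fdiv a 1000000 = a / 1000000
  rw [Int.fdiv_eq_ediv]; simp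

theorem pv_fmod_pos (a : Int) : PySem.Int.mod a 1000000 = a % 1000000 := by
  show Int.fmod a 1000000 = a % 1000000
  rw [Int.fmod_eq_emod]; simp

theorem pv_loopA (fn : String) (q : Nat) :
    (PySem.List.pyRange 1 ((q : Int) + 1) 1).foldl
      (fun (s : Int × List String × List Int × List Int) r =>
        (s.1 + 1000000,
         s.2.1 ++ [fn ++ "_" ++ PySem.Int.toStr r ++ ".xlsx"],
         s.2.2.1 ++ [s.1],
         s.2.2.2 ++ [s.1 + 1000000]))
      (0, [], [], []) =
    ((q : Int) * 1000000,
     (List.range q).map (fun i : Nat => fn ++ "_" ++ PySem.Int.toStr ((i : Int) + 1) ++ ".xlsx"),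
     (List.range q).map (fun i : Nat => ((i : Int) * 1000000 : Int)),
     (List.range q).map (fun i : Nat => (((i : Int) + 1) * 1000000 : Int))) := by
  induction q with
  | zero => simp [PySem.List.pyRange_one_eq_nil]
  | succ k ih =>
      have hsplit : PySem.List.pyRange 1 ((k + 1 : Nat) + 1 : Int) 1
          = PySem.List.pyRange 1 ((k : Int) + 1) 1 ++ [(k : Int) + 1] := by
        have := PySem.List.pyRange_one_succ_right (a := 1) (b := (k : Int) + 1)
          (by omega)
        push_cast at this
        exact this
      rw [hsplit, List.foldl_append, ih]
      simp only [List.foldl_cons, List.foldl_nil, List.range_succ]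
      refine Prod.ext ?_ (Prod.ext ?_ (Prod.ext ?_ ?_)) <;> simp <;> ring_nf

-- B's comprehension over range(c) as a map over List.range
theorem pv_rangeB {α : Type} (c : Nat) (f : Int → α) :
    (PySem.List.pyRange 0 (c : Int) 1).map f = (List.range c).map (fun k : Nat => f (Int.ofNat k)) := by
  rw [PySem.List.pyRange_one]
  simp only [sub_zero, Int.toNat_natCast, List.map_map]
  apply List.map_congr_left; intro k _
  simp [Int.ofNat_eq_natCast]

theorem pv_main : ∀ (fn : String) (n : Int),
    get_file_names fn n = get_file_names_alt fn n := by
  intro fn n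
  unfold get_file_names get_file_names_alt
  simp only [pv_fdiv_pos, pv_fmod_pos]
  by_cases hq : n / 1000000 > 0
  case neg => simp [hq]
  case pos =>
    obtain ⟨qn, hqn⟩ : ∃ m : Nat, n / 1000000 = ((m : Nat) : Int) + 1 :=
      ⟨(n / 1000000 - 1).toNat, by omega⟩
    have hn : ((qn : Int) + 1) * 1000000 ≤ n ∧ n < ((qn : Int) + 2) * 1000000 := by
      constructor <;> omega
    have hceil : -(-n / 1000000)
        = if n % 1000000 > 0 then ((qn : Int) + 2) else ((qn : Int) + 1) := by
      split_ifs with h <;> omega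
    rw [hqn, hceil]
    have hpos : ((qn : Int) + 1) > 0 := by omega
    rw [if_pos hpos, if_pos hpos]
    have hA := pv_loopA fn (qn + 1)
    rw [show ((qn + 1 : Nat) : Int) = (qn : Int) + 1 by push_cast; ring] at hA
    rw [hA]
    by_cases hr : n % 1000000 > 0
    · rw [if_pos hr, if_pos hr]
      rw [show ((qn : Int) + 2) = ((qn + 2 : Nat) : Int) by push_cast; ring]
      rw [pv_rangeB, pv_rangeB, pv_rangeB]
      rw [List.range_succ (n := qn + 1)]
      simp only [List.map_append, List.map_cons, List.map_nil, Int.ofNat_eq_natCast]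
      have emin : List.map (fun i : Nat => min (((i : Int) + 1) * 1000000) n) (List.range (qn + 1))
          = List.map (fun i : Nat => ((((i : Int) + 1) * 1000000 : Int))) (List.range (qn + 1)) := by
        apply List.map_congr_left; intro i hi
        simp only [List.mem_range] at hi
        omega
      rw [emin]
      push_cast
      simp only [Prod.mk.injEq, List.append_cancel_left_eq, List.cons.injEq, and_true]
      refine ⟨trivial, trivial, ?_⟩
      omega
    · rw [if_neg hr, if_neg hr]
      rw [show ((qn : Int) + 1) = ((qn + 1 : Nat) : Int) by push_cast; ring]
      rw [pv_rangeB, pv_rangeB, pv_rangeB]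
      simp only [Int.ofNat_eq_natCast]
      have emin : List.map (fun i : Nat => min (((i : Int) + 1) * 1000000) n) (List.range (qn + 1))
          = List.map (fun i : Nat => ((((i : Int) + 1) * 1000000 : Int))) (List.range (qn + 1)) := by
        apply List.map_congr_left; intro i hi
        simp only [List.mem_range] at hi
        omega
      rw [emin]

-- ===== VERDICT (by name: the statement is the Claim_ definition above) =====
theorem get_file_names_spec : Claim_equal_get_file_names := by
  intro fn n _
  unfold Spec_get_file_names
  exact pv_main fn n
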